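-- pv_equiv track=rewrite | github.com/RAM2635/FlowerDelivery | shop_project/analytics/utils.py | count_orders_by_date
-- ===== SOURCE A (Python) =====
-- def count_orders_by_date(orders):
--     if not orders:
--         return {}
--
--     date_counts = {}
--     for order in orders:
--         date = order.get("Date_Created")
--         if date:
--             date_counts[date] = date_counts.get(date, 0) + 1
--
--     return date_counts
-- ===== SOURCE B (Python) =====
-- def count_orders_by_date(orders):
--     dates = [d for d in (order.get("Date_Created") for order in orders) if d]
--     return {d: dates.count(d) for d in dict.fromkeys(dates)}
-- ===== Notes on version B (the rewrite author's own statement) =====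
-- stated objective: simpler
-- what changed: Replaces the incremental dict-counter loop with a two-phase pipeline: extract the truthy dates into a list, then build the result as a comprehension over the ordered-deduplicated dates with list.count; no mutable counting dict and no empty-input guard.
import Mathlib
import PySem

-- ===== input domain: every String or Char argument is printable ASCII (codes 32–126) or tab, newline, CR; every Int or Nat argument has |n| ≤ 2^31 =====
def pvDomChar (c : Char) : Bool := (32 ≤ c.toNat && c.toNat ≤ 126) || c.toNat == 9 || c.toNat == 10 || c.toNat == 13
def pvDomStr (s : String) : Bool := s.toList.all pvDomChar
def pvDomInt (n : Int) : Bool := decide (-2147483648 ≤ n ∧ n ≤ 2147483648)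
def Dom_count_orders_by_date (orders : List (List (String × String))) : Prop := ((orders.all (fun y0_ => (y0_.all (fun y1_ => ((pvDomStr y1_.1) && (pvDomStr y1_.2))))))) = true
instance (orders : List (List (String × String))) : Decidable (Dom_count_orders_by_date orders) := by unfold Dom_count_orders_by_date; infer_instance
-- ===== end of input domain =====

-- B rewrites A's incremental dict-counter loop as a two-phase pipeline (extract truthy dates,
-- then map ordered-deduplicated dates to their counts): simpler decomposition, not faster.


-- ===== PORT A =====
def count_orders_by_date (orders : List (List (String × String))) : List (String × Int) :=
  if orders = [] then []
  else
    (orders.foldl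
      (fun (date_counts : PySem.Dict String Int) order =>
        let date := (PySem.Dict.mk order).get? "Date_Created"
        match date with
        | some d => if d ≠ "" then date_counts.insert d (date_counts.getD d 0 + 1) else date_counts
        | none => date_counts)
      PySem.Dict.empty).items

-- ===== PORT B =====
-- the generator + truthiness filter of Source B
def pvExtractDate (order : List (String × String)) : Option String :=
  match (PySem.Dict.mk order).get? "Date_Created" with
  | some d => if d = "" then none else some d
  | none => none

def count_orders_by_date_alt (orders : List (List (String × String))) : List (String × Int) :=
  let dates := orders.filterMap pvExtractDate
  (PySem.List.dedup dates).map (fun d => (d, (dates.count d : Int)))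

-- ===== PRECONDITION & SPEC =====
def Spec_count_orders_by_date (orders : List (List (String × String))) (out : List (String × Int)) : Prop := out = count_orders_by_date_alt orders
instance (orders : List (List (String × String))) (out : List (String × Int)) : Decidable (Spec_count_orders_by_date orders out) := by unfold Spec_count_orders_by_date; infer_instance

-- ===== CLAIM (what is proved, stated in full; the proofs are below) =====
def Claim_equal_count_orders_by_date : Prop := ∀ (orders : List (List (String × String))), Dom_count_orders_by_date orders → Spec_count_orders_by_date orders (count_orders_by_date orders)

-- ===== LEMMAS AND PROOFS =====

-- A's loop over orders is the counter loop over the extracted dates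
theorem pvFoldA_eq (orders : List (List (String × String))) (dc : PySem.Dict String Int) :
    orders.foldl
      (fun (date_counts : PySem.Dict String Int) order =>
        let date := (PySem.Dict.mk order).get? "Date_Created"
        match date with
        | some d => if d ≠ "" then date_counts.insert d (date_counts.getD d 0 + 1) else date_counts
        | none => date_counts)
      dc
    = (orders.filterMap pvExtractDate).foldl
        (fun (d : PySem.Dict String Int) x => d.insert x (d.getD x 0 + 1)) dc := by
  induction orders generalizing dc with
  | nil => rfl
  | cons o rest ih =>
    simp only [List.foldl_cons, List.filterMap_cons]
    unfold pvExtractDate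
    cases h : (PySem.Dict.mk o).get? "Date_Created" with
    | none => exact ih dc
    | some d =>
      by_cases hd : d = ""
      · simp only [hd]
        simpa using ih dc
      · simp only [hd]
        simpa [hd] using ih (dc.insert d (dc.getD d 0 + 1))

-- ===== VERDICT (by name: the statement is the Claim_ definition above) =====
theorem count_orders_by_date_spec : Claim_equal_count_orders_by_date := by
  intro orders _
  unfold Spec_count_orders_by_date count_orders_by_date count_orders_by_date_alt
  by_cases h : orders = []
  · subst h; rfl
  · simp only [h, if_false]
    rw [pvFoldA_eq, PySem.Dict.foldl_insert_getD_add_one_eq_counter,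
        PySem.Dict.items_counter, PySem.List.dedup_eq_ofList]
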